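-- pv_equiv track=rewrite | github.com/iknowright/data-mining-association-rules | algorithm/apriori.py | _create_candidate1
-- ===== SOURCE A (Python) =====
-- def _create_candidate1(data):
--     """
--     Find unique items from dataset (Also initial candidate)
--     """
--
--     initial_candidate = []
--     for transaction in data:
--         for item in transaction:
--             if not [item] in initial_candidate:
--                 initial_candidate.append([item])
--     initial_candidate.sort()
--     return initial_candidate
-- ===== SOURCE B (Python) =====
-- def _create_candidate1(data):
--     """
--     Find unique items from dataset (Also initial candidate)
--     """
--     flat = [item for transaction in data for item in transaction]
--     flat.sort()
--     result = []
--     prev = None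
--     for item in flat:
--         if prev is None or item != prev:
--             result.append([item])
--         prev = item
--     return result
-- ===== Notes on version B (the rewrite author's own statement) =====
-- stated objective: faster
-- what changed: Replaces the quadratic build-unique-list-with-membership-scan-then-sort with flatten once, sort once, then a single linear adjacent-dedup pass.
import Mathlib
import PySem

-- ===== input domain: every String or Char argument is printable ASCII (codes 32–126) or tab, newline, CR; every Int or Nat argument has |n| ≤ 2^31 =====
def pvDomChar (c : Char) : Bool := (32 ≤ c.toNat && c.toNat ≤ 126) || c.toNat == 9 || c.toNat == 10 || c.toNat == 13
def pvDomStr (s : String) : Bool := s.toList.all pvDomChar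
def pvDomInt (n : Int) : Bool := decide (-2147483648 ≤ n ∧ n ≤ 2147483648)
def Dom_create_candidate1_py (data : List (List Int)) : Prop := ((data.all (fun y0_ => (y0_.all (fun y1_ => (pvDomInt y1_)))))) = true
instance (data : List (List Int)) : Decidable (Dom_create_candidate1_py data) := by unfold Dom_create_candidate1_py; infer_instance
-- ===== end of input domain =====

-- B flattens all transactions, sorts once, then one linear adjacent-dedup pass (faster by the
-- timing run: O(n log n) vs A's quadratic membership scans); equal output proved for all inputs.


-- ===== PORT A =====
-- 'if not [item] in initial_candidate: initial_candidate.append([item])'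
def aStep (acc : List (List Int)) (item : Int) : List (List Int) :=
  if [item] ∈ acc then acc else acc ++ [[item]]

def create_candidate1_py (data : List (List Int)) : List (List Int) :=
  let initial_candidate :=
    data.foldl (fun acc transaction => transaction.foldl aStep acc) []
  PySem.List.sorted initial_candidate (fun x => x) false

-- ===== PORT B =====
-- 'for item in flat: if prev is None or item != prev: result.append([item]); prev = item'
def bLoop (flat : List Int) (prev : Option Int) (result : List (List Int)) : List (List Int) :=
  match flat with
  | [] => result
  | item :: rest =>
      if prev = none ∨ some item ≠ prev then bLoop rest (some item) (result ++ [[item]])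
      else bLoop rest (some item) result

def create_candidate1_py_alt (data : List (List Int)) : List (List Int) :=
  let flat := data.flatMap (fun transaction => transaction)
  bLoop (PySem.List.sorted flat (fun x => x) false) none []

-- ===== PRECONDITION & SPEC =====
def Spec_create_candidate1_py (data : List (List Int)) (out : List (List Int)) : Prop := out = create_candidate1_py_alt data
instance (data : List (List Int)) (out : List (List Int)) : Decidable (Spec_create_candidate1_py data out) := by unfold Spec_create_candidate1_py; infer_instance

-- ===== CLAIM (what is proved, stated in full; the proofs are below) =====
def Claim_equal_create_candidate1_py : Prop := ∀ (data : List (List Int)), Dom_create_candidate1_py data → Spec_create_candidate1_py data (create_candidate1_py data)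

-- ===== LEMMAS AND PROOFS =====

-- the kept items of B's loop, without the accumulator / singleton wrapping
def bCore (flat : List Int) (prev : Option Int) : List Int :=
  match flat with
  | [] => []
  | item :: rest =>
      if prev = none ∨ some item ≠ prev then item :: bCore rest (some item)
      else bCore rest (some item)

theorem bLoop_eq_core (flat : List Int) (prev : Option Int) (result : List (List Int)) :
    bLoop flat prev result = result ++ (bCore flat prev).map (fun x => [x]) := by
  induction flat generalizing prev result with
  | nil => simp [bLoop, bCore]
  | cons x rest ih =>
      simp only [bLoop, bCore]
      split_ifs with h
      · rw [ih]; simp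
      · rw [ih]

theorem mem_bCore (flat : List Int) (prev : Option Int)
    (hs : flat.Pairwise (· ≤ ·)) (hlb : ∀ p, prev = some p → ∀ y ∈ flat, p ≤ y) :
    ∀ y, y ∈ bCore flat prev ↔ y ∈ flat ∧ prev ≠ some y := by
  induction flat generalizing prev with
  | nil => simp [bCore]
  | cons x rest ih =>
      have hx : ∀ y ∈ rest, x ≤ y := (List.pairwise_cons.mp hs).1
      have hrest := (List.pairwise_cons.mp hs).2
      have hy := ih (some x) hrest (fun p hp y hyr => by cases hp; exact hx y hyr)
      intro y
      simp only [bCore]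
      split_ifs with h
      · -- item kept: prev = none or prev ≠ some x
        simp only [List.mem_cons, hy]
        rcases prev with _ | p
        · constructor
          · rintro (rfl | ⟨hm, _⟩)
            · exact ⟨Or.inl rfl, by simp⟩
            · exact ⟨Or.inr hm, by simp⟩
          · rintro ⟨hm | hm, _⟩
            · exact Or.inl hm
            · by_cases hyx : y = x
              · exact Or.inl hyx
              · exact Or.inr ⟨hm, fun hc => hyx (Option.some.inj hc).symm⟩
        · have hpx : p ≠ x := by
            rcases h with h | h
            · exact absurd h (by simp)
            · intro hc; exact h (by rw [hc])
          have hplt : p < x := lt_of_le_of_ne (hlb p rfl x (List.mem_cons_self)) hpx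
          constructor
          · rintro (rfl | ⟨hm, _⟩)
            · exact ⟨Or.inl rfl, fun hc => hpx (Option.some.inj hc)⟩
            · have : p < y := lt_of_lt_of_le hplt (hx y hm)
              exact ⟨Or.inr hm, fun hc => absurd (Option.some.inj hc) this.ne⟩
          · rintro ⟨hm | hm, hne⟩
            · exact Or.inl hm
            · by_cases hyx : y = x
              · exact Or.inl hyx
              · exact Or.inr ⟨hm, fun hc => hyx (Option.some.inj hc).symm⟩
      · -- item skipped: prev = some x
        have hpx' : prev = some x := by
          rcases prev with _ | p
          · exact absurd (Or.inl rfl) h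
          · have : ¬ some x ≠ some p := fun hc => h (Or.inr hc)
            simpa using (not_not.mp this).symm
        subst hpx'
        rw [hy]
        simp only [List.mem_cons]
        constructor
        · rintro ⟨hm, hne⟩; exact ⟨Or.inr hm, hne⟩
        · rintro ⟨hm | hm, hne⟩
          · exact absurd (congrArg some hm.symm) hne
          · exact ⟨hm, hne⟩

theorem pairwise_bCore (flat : List Int) (prev : Option Int)
    (hs : flat.Pairwise (· ≤ ·)) :
    (bCore flat prev).Pairwise (· < ·) := by
  induction flat generalizing prev with
  | nil => exact List.Pairwise.nil
  | cons x rest ih =>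
      have hx : ∀ y ∈ rest, x ≤ y := (List.pairwise_cons.mp hs).1
      have hrest := (List.pairwise_cons.mp hs).2
      simp only [bCore]
      split_ifs with h
      · refine List.pairwise_cons.mpr ⟨?_, ih (some x) hrest⟩
        intro y hy
        have := (mem_bCore rest (some x) hrest (by intro p hp; cases hp; exact hx) y).mp hy
        exact lt_of_le_of_ne (hx y this.1) (by intro hc; exact this.2 (congrArg some hc))
      · exact ih (some x) hrest

theorem mem_afold (L : List Int) (acc : List (List Int)) :
    ∀ z, z ∈ L.foldl aStep acc ↔ z ∈ acc ∨ ∃ i ∈ L, z = [i] := by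
  induction L generalizing acc with
  | nil => simp
  | cons i rest ih =>
      intro z
      simp only [List.foldl_cons, ih]
      unfold aStep
      split_ifs with h
      · aesop
      · aesop

theorem nodup_afold (L : List Int) (acc : List (List Int)) (h : acc.Nodup) :
    (L.foldl aStep acc).Nodup := by
  induction L generalizing acc with
  | nil => simpa
  | cons i rest ih =>
      simp only [List.foldl_cons]
      apply ih
      unfold aStep
      split_ifs with hm
      · exact h
      · exact List.Nodup.append h (List.nodup_singleton _) (by simpa [List.disjoint_right] using hm)

theorem singleton_lt (a b : Int) (h : a < b) : ([a] : List Int) < [b] := List.Lex.rel h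

-- ===== VERDICT (by name: the statement is the Claim_ definition above) =====
theorem create_candidate1_py_spec : Claim_equal_create_candidate1_py := by
  intro data _
  unfold Spec_create_candidate1_py create_candidate1_py create_candidate1_py_alt
  simp only []
  rw [bLoop_eq_core, List.nil_append]
  rw [show List.flatMap (fun transaction => transaction) data = data.flatten from List.flatMap_id']
  have hfold : data.foldl (fun acc transaction => transaction.foldl aStep acc) [] =
      data.flatten.foldl aStep [] := List.foldl_flatten.symm
  rw [hfold]
  set s := PySem.List.sorted data.flatten (fun x => x) false with hs
  have hsp : s.Pairwise (· ≤ ·) := PySem.List.sorted_pairwise data.flatten (fun x => x)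
  have hpc : (bCore s none).Pairwise (· < ·) := pairwise_bCore s none hsp
  have hys_pw : ((bCore s none).map (fun x => [x])).Pairwise (fun a b => a < b) :=
    List.Pairwise.map _ (fun a b hab => singleton_lt a b hab) hpc
  have hD : (fun (a b : List Int) => a.decidableLT b) = @LinearOrder.toDecidableLT _ List.instLinearOrder := by
    funext a b; exact Subsingleton.elim _ _
  rw [hD]
  apply PySem.List.sorted_eq_of_perm_of_pairwise_lt _ _ (fun x => x) _ hys_pw
  -- permutation: both are nodup with the same members
  have hnd_ys : ((bCore s none).map (fun x => [x])).Nodup :=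
    (hpc.map _ (fun a b hab => singleton_lt a b hab)).imp (fun hab => ne_of_lt hab)
  have hnd_ic : (data.flatten.foldl aStep []).Nodup := nodup_afold _ _ List.nodup_nil
  rw [List.perm_ext_iff_of_nodup hnd_ys hnd_ic]
  intro z
  have hmc := mem_bCore s none hsp (by simp) ;
  simp only [List.mem_map]
  constructor
  · rintro ⟨i, hi, rfl⟩
    have := (hmc i).mp hi
    exact (mem_afold data.flatten [] _).mpr
      (Or.inr ⟨i, (PySem.List.mem_sorted ..).mp this.1, rfl⟩)
  · intro hz
    rcases (mem_afold data.flatten [] _).mp hz with hm | ⟨i, hi, rfl⟩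
    · simp at hm
    · exact ⟨i, (hmc i).mpr ⟨(PySem.List.mem_sorted ..).mpr hi, by simp⟩, rfl⟩
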